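-- pv_equiv track=rewrite | github.com/wlab-45/odepcellarray | simulation/分區水平垂直前進.py | collision_in_path
-- ===== SOURCE A (Python) =====
-- def collision_in_path(whole_path_batch, Rl):
--
--     max_path_length = max(len(path) for path in whole_path_batch)
--     collision_list = []
--
--     for step in range(max_path_length):
--         active_points = []  # 當前時間步所有粒子的位置
--         path_indices = []  # 記錄對應的 path 編號
--
--         for idx, path in enumerate(whole_path_batch):
--             if step < len(path):
--                 active_points.append(path[step])
--                 path_indices.append(idx)  # 記錄這個點對應的路徑編號
--
--         # 檢查當前時間步的所有點，是否有兩點距離過近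
--         for i in range(len(active_points)):
--             for j in range(i + 1, len(active_points)):
--                 dx = abs(active_points[i][0] - active_points[j][0])
--                 dy = abs(active_points[i][1] - active_points[j][1])
--
--                 if dx**2 + dy**2 < 4*Rl**2:
--                     collision_list.append((path_indices[i], path_indices[j], step))
--     return collision_list
-- ===== SOURCE B (Python) =====
-- def collision_in_path(whole_path_batch, Rl):
--     n = len(whole_path_batch)
--     r2 = 4 * Rl * Rl
--     hits = []
--     for i in range(n):
--         pi = whole_path_batch[i]
--         for j in range(i + 1, n):
--             pj = whole_path_batch[j]
--             for step in range(min(len(pi), len(pj))):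
--                 dx = pi[step][0] - pj[step][0]
--                 dy = pi[step][1] - pj[step][1]
--                 if dx * dx + dy * dy < r2:
--                     hits.append((i, j, step))
--     hits.sort(key=lambda t: t[2])
--     return hits
-- ===== Notes on version B (the rewrite author's own statement) =====
-- stated objective: alternative
-- what changed: B iterates over path pairs (walking each pair's common prefix once) instead of rebuilding per-step active-point lists and pairing them, then restores A's step-major order with one stable sort on the step component.
import Mathlib
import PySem

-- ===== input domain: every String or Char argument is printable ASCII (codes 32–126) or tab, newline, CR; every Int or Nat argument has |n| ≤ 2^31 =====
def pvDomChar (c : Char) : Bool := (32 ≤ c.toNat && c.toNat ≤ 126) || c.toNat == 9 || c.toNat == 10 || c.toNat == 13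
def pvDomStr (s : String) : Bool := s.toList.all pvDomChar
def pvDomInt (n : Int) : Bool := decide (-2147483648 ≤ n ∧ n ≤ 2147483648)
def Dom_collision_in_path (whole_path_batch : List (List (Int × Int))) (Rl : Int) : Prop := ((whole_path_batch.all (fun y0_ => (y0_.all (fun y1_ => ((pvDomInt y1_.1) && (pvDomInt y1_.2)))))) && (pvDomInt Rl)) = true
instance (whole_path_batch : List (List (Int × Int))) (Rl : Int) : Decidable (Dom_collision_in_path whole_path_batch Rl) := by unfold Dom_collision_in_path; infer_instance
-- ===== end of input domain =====

-- B replaces A's per-step active-point rebuild + quadratic pairing by a pair-of-paths outer loop over each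
-- pair's common prefix, then one stable sort on the step component restores A's step-major output order
-- (objective: alternative decomposition, same exact output).

-- ===== PORT A =====
def collision_in_path (whole_path_batch : List (List (Int × Int))) (Rl : Int) : List (Int × Int × Int) :=
  match PySem.List.max? (whole_path_batch.map (fun path => PySem.List.len path)) (fun x => x) with
  | none => []  -- Python: max() of an empty sequence raises ValueError; excluded by Pre_
  | some max_path_length =>
    (PySem.List.pyRange 0 max_path_length).foldl (fun collision_list step =>
      let ap := (PySem.List.enumerate whole_path_batch).foldl
        (fun (ap : List (Int × Int) × List Int) ip =>
          if step < PySem.List.len ip.2 then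
            (ap.1 ++ [PySem.List.pyGetD ip.2 step (0, 0)], ap.2 ++ [ip.1])
          else ap) ([], [])
      (PySem.List.pyRange 0 (PySem.List.len ap.1)).foldl (fun c1 i =>
        (PySem.List.pyRange (i + 1) (PySem.List.len ap.1)).foldl (fun c2 j =>
          if |(PySem.List.pyGetD ap.1 i (0,0)).1 - (PySem.List.pyGetD ap.1 j (0,0)).1| ^ 2
             + |(PySem.List.pyGetD ap.1 i (0,0)).2 - (PySem.List.pyGetD ap.1 j (0,0)).2| ^ 2
             < 4 * Rl ^ 2 then
            c2 ++ [(PySem.List.pyGetD ap.2 i 0, PySem.List.pyGetD ap.2 j 0, step)]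
          else c2) c1) collision_list) []

-- ===== PORT B =====
def collision_in_path_alt (whole_path_batch : List (List (Int × Int))) (Rl : Int) : List (Int × Int × Int) :=
  let n := PySem.List.len whole_path_batch
  let r2 := 4 * Rl * Rl
  let hits := (PySem.List.pyRange 0 n).foldl (fun hits i =>
    let pi := PySem.List.pyGetD whole_path_batch i []
    (PySem.List.pyRange (i + 1) n).foldl (fun hits j =>
      let pj := PySem.List.pyGetD whole_path_batch j []
      (PySem.List.pyRange 0 (min (PySem.List.len pi) (PySem.List.len pj))).foldl (fun hits step =>
        let dx := (PySem.List.pyGetD pi step (0,0)).1 - (PySem.List.pyGetD pj step (0,0)).1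
        let dy := (PySem.List.pyGetD pi step (0,0)).2 - (PySem.List.pyGetD pj step (0,0)).2
        if dx * dx + dy * dy < r2 then hits ++ [(i, j, step)] else hits) hits) hits) []
  PySem.List.sorted hits (fun t => t.2.2) false

-- ===== PRECONDITION & SPEC =====
-- Pre_ excludes only the empty batch, on which Python A raises ValueError (max of an empty sequence).
def Pre_collision_in_path (whole_path_batch : List (List (Int × Int))) (Rl : Int) : Prop :=
  whole_path_batch ≠ []
instance (whole_path_batch : List (List (Int × Int))) (Rl : Int) : Decidable (Pre_collision_in_path whole_path_batch Rl) := by unfold Pre_collision_in_path; infer_instance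
def pvWitness_collision_in_path : (List (List (Int × Int))) × Int := ([[(0, 0)], [(1, 1)]], 2)

def Spec_collision_in_path (whole_path_batch : List (List (Int × Int))) (Rl : Int) (out : List (Int × Int × Int)) : Prop := out = collision_in_path_alt whole_path_batch Rl
instance (whole_path_batch : List (List (Int × Int))) (Rl : Int) (out : List (Int × Int × Int)) : Decidable (Spec_collision_in_path whole_path_batch Rl out) := by unfold Spec_collision_in_path; infer_instance

-- ===== CLAIM (what is proved, stated in full; the proofs are below) =====
def Claim_equal_collision_in_path : Prop := ∀ (whole_path_batch : List (List (Int × Int))) (Rl : Int), Dom_collision_in_path whole_path_batch Rl → Pre_collision_in_path whole_path_batch Rl → Spec_collision_in_path whole_path_batch Rl (collision_in_path whole_path_batch Rl)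

-- ===== LEMMAS AND PROOFS =====

/-- Ordered pairs (x before y) of a list. -/
def pvPairs {α : Type} : List α → List (α × α)
  | [] => []
  | x :: xs => xs.map (fun y => (x, y)) ++ pvPairs xs

theorem pvPairs_mem {α : Type} {l : List α} {pq : α × α} (h : pq ∈ pvPairs l) :
    pq.1 ∈ l ∧ pq.2 ∈ l := by
  induction l with
  | nil => simp [pvPairs] at h
  | cons x xs ih =>
    simp only [pvPairs, List.mem_append, List.mem_map] at h
    rcases h with ⟨y, hy, rfl⟩ | h
    · exact ⟨List.mem_cons_self, List.mem_cons_of_mem _ hy⟩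
    · exact ⟨List.mem_cons_of_mem _ (ih h).1, List.mem_cons_of_mem _ (ih h).2⟩

theorem pvPairs_map {α β : Type} (f : α → β) (l : List α) :
    pvPairs (l.map f) = (pvPairs l).map (Prod.map f f) := by
  induction l with
  | nil => simp [pvPairs]
  | cons x xs ih => simp [pvPairs, ih, List.map_map]

theorem pvPairs_filter {α : Type} (p : α → Bool) (l : List α) :
    pvPairs (l.filter p) = (pvPairs l).filter (fun pq => p pq.1 && p pq.2) := by
  induction l with
  | nil => simp [pvPairs]
  | cons x xs ih =>
    by_cases hx : p x
    · simp only [List.filter_cons, hx, if_true, pvPairs, ih, List.filter_append,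
        List.filter_map]
      congr 1
      apply congrArg
      apply List.filter_congr
      intro y _
      simp [hx]
    · simp [pvPairs, hx, ih, List.filter_append, List.filter_map, Function.comp]

/-- Double nested increasing index loops = flatMap over ordered pairs of the range. -/
theorem pvRP {β : Type} (a b : Int) (G : Int → Int → List β) :
    (PySem.List.pyRange a b).flatMap (fun i => (PySem.List.pyRange (i+1) b).flatMap (fun j => G i j))
      = (pvPairs (PySem.List.pyRange a b)).flatMap (fun pq => G pq.1 pq.2) := by
  by_cases hab : b ≤ a
  · simp [PySem.List.pyRange_one_eq_nil hab, pvPairs]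
  rw [not_le] at hab
  obtain ⟨n, hn⟩ : ∃ n : Nat, b - a = n := ⟨(b-a).toNat, by omega⟩
  induction n generalizing a with
  | zero => omega
  | succ n ih =>
    rw [PySem.List.pyRange_one_cons hab]
    simp only [List.flatMap_cons, pvPairs, List.flatMap_append, List.flatMap_map]
    by_cases h2 : a + 1 < b
    · rw [ih (a+1) h2 (by omega)]
    · have : b ≤ a + 1 := by omega
      simp [PySem.List.pyRange_one_eq_nil this, pvPairs]

/-- Pair indices resolved through pyGetD = ordered pairs of the list itself. -/
theorem pvPG {α β : Type} (l : List α) (d : α) (K : α → α → List β) :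
    (pvPairs (PySem.List.pyRange 0 (PySem.List.len l))).flatMap
        (fun pq => K (PySem.List.pyGetD l pq.1 d) (PySem.List.pyGetD l pq.2 d))
      = (pvPairs l).flatMap (fun pq => K pq.1 pq.2) := by
  conv_rhs => rw [show l = (PySem.List.pyRange 0 (PySem.List.len l)).map
      (fun j => PySem.List.pyGetD l j d) from (PySem.List.map_pyGetD_pyRange_zero l d).symm]
  rw [pvPairs_map, List.flatMap_map]
  rfl

theorem pvFlatMap_filter {α β : Type} (q : α → Bool) (h : α → List β) (l : List α) :
    (l.filter q).flatMap h = l.flatMap (fun x => if q x then h x else []) := by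
  induction l with
  | nil => rfl
  | cons x xs ih => by_cases hx : q x <;> simp [hx, ih]

theorem pvFlatMap_range_single {β : Type} (a b s : Int) (L : List β) :
    (PySem.List.pyRange a b).flatMap (fun s' => if s' = s then L else [])
      = if a ≤ s ∧ s < b then L else [] := by
  by_cases hab : b ≤ a
  · simp [PySem.List.pyRange_one_eq_nil hab]; omega
  rw [not_le] at hab
  obtain ⟨n, hn⟩ : ∃ n : Nat, b - a = n := ⟨(b-a).toNat, by omega⟩
  induction n generalizing a with
  | zero => omega
  | succ n ih =>
    rw [PySem.List.pyRange_one_cons hab, List.flatMap_cons]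
    by_cases has : a = s
    · subst has
      have : ∀ s' ∈ PySem.List.pyRange (a+1) b, (if s' = a then L else ([]:List β)) = [] := by
        intro s' hs'
        rw [PySem.List.mem_pyRange_one] at hs'
        simp; omega
      rw [List.flatMap_congr this]
      simp [List.flatMap]
      omega
    · simp only [has, if_false]
      by_cases h2 : a + 1 < b
      · rw [ih (a+1) h2 (by omega)]
        rw [List.nil_append]
        have he : (a+1 ≤ s ∧ s < b) ↔ (a ≤ s ∧ s < b) := by
          constructor <;> (intro h; constructor <;> omega)
        simp only [he]
      · have : b ≤ a + 1 := by omega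
        simp [PySem.List.pyRange_one_eq_nil this]
        omega

theorem pvInsertBy_skip {α : Type} (before : α → α → Bool) (x : α) (as bs : List α)
    (h : ∀ a ∈ as, before x a = false) :
    PySem.List.insertBy before x (as ++ bs) = as ++ PySem.List.insertBy before x bs := by
  induction as with
  | nil => rfl
  | cons a as ih =>
    simp only [List.cons_append, PySem.List.insertBy, h a List.mem_cons_self]
    simp only [Bool.false_eq_true, if_false]
    exact congrArg (a :: ·) (ih fun a ha => h a (List.mem_cons_of_mem _ ha))

theorem pvInsertBy_front {α : Type} (before : α → α → Bool) (x : α) (ys : List α)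
    (h : ∀ y ∈ ys, before x y = true) :
    PySem.List.insertBy before x ys = x :: ys := by
  cases ys with
  | nil => rfl
  | cons y ys => simp [PySem.List.insertBy, h y List.mem_cons_self]

/-- Inserting into a bucketed-by-key list appends at the end of the key's bucket. -/
theorem pvL1 (a b : Int) (g : Int → List (Int × Int × Int)) (x : Int × Int × Int)
    (hg : ∀ s, ∀ t ∈ g s, t.2.2 = s) (ha : a ≤ x.2.2) (hb : x.2.2 < b) :
    PySem.List.insertBy (fun p q => decide (p.2.2 < q.2.2)) x
        ((PySem.List.pyRange a b).flatMap g)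
      = (PySem.List.pyRange a b).flatMap (fun s => if s = x.2.2 then g s ++ [x] else g s) := by
  have hab : a < b := by omega
  obtain ⟨n, hn⟩ : ∃ n : Nat, b - a = n := ⟨(b-a).toNat, by omega⟩
  induction n generalizing a with
  | zero => omega
  | succ n ih =>
    rw [PySem.List.pyRange_one_cons hab, List.flatMap_cons, List.flatMap_cons]
    by_cases has : a = x.2.2
    · subst has
      rw [pvInsertBy_skip _ _ _ _ (fun t ht => by simp [hg _ t ht])]
      rw [pvInsertBy_front _ _ _ (fun t ht => ?_)]
      · rw [if_pos rfl, List.append_assoc, List.singleton_append]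
        congr 2
        apply List.flatMap_congr
        intro s hs
        rw [PySem.List.mem_pyRange_one] at hs
        rw [if_neg (by omega)]
      · rw [List.mem_flatMap] at ht
        obtain ⟨s, hs, hts⟩ := ht
        rw [PySem.List.mem_pyRange_one] at hs
        have := hg s t hts
        simp; omega
    · have hlt : a < x.2.2 := by omega
      rw [pvInsertBy_skip _ _ _ _ (fun t ht => by have := hg a t ht; simp; omega)]
      rw [if_neg (by omega)]
      congr 1
      exact ih (a+1) (by omega) (by omega) (by omega)

theorem pvL2 (b : Int) (H : List (Int × Int × Int)) (g : Int → List (Int × Int × Int))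
    (hg : ∀ s, ∀ t ∈ g s, t.2.2 = s) (hH : ∀ t ∈ H, 0 ≤ t.2.2 ∧ t.2.2 < b) :
    H.foldl (fun acc x => PySem.List.insertBy (fun p q => decide (p.2.2 < q.2.2)) x acc)
        ((PySem.List.pyRange 0 b).flatMap g)
      = (PySem.List.pyRange 0 b).flatMap (fun s => g s ++ H.filter (fun t => t.2.2 == s)) := by
  induction H generalizing g with
  | nil => simp
  | cons x H ih =>
    rw [List.foldl_cons]
    rw [pvL1 0 b g x hg (hH x List.mem_cons_self).1 (hH x List.mem_cons_self).2]
    rw [ih _ (fun s t ht => by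
        by_cases hs : s = x.2.2
        · subst hs
          rw [if_pos rfl, List.mem_append] at ht
          rcases ht with h | h
          · exact hg _ t h
          · rw [List.mem_singleton] at h; rw [h]
        · rw [if_neg hs] at ht; exact hg s t ht)
      (fun t ht => hH t (List.mem_cons_of_mem _ ht))]
    apply List.flatMap_congr
    intro s _
    by_cases hs : s = x.2.2
    · subst hs
      rw [if_pos rfl, List.filter_cons, List.append_assoc]
      simp
    · rw [if_neg hs, List.filter_cons, if_neg (by simpa using fun h => hs h.symm)]

/-- Stable sort on the step key = bucket concatenation, for keys within [0, b). -/
theorem pvBucket (b : Int) (H : List (Int × Int × Int))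
    (hH : ∀ t ∈ H, 0 ≤ t.2.2 ∧ t.2.2 < b) :
    PySem.List.sorted H (fun t => t.2.2) false
      = (PySem.List.pyRange 0 b).flatMap (fun s => H.filter (fun t => t.2.2 == s)) := by
  rw [PySem.List.sorted_eq_foldl_insertBy]
  have h2 := pvL2 b H (fun _ => []) (fun s t ht => by simp at ht) hH
  rw [show (List.flatMap (fun _ => ([] : List (Int × Int × Int))) (PySem.List.pyRange 0 b)) = []
    from by simp] at h2
  simpa using h2

theorem pvFoldl_pair_filter {α β γ : Type} (p : α → Prop) [DecidablePred p]
    (f : α → β) (g : α → γ) (l : List α) (acc1 : List β) (acc2 : List γ) :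
    l.foldl (fun ap x => if p x then (ap.1 ++ [f x], ap.2 ++ [g x]) else ap) (acc1, acc2)
      = (acc1 ++ ((l.filter (fun x => decide (p x))).map f),
         acc2 ++ ((l.filter (fun x => decide (p x))).map g)) := by
  induction l generalizing acc1 acc2 with
  | nil => simp
  | cons x xs ih =>
    by_cases h : p x
    · simp only [List.foldl_cons, if_pos h, List.filter_cons, decide_eq_true h]
      rw [ih]
      simp
    · simp only [List.foldl_cons, if_neg h, List.filter_cons]
      rw [ih]
      simp [h]

/-- A's per-step collision bucket, over ordered pairs of the alive enumerated entries. -/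
def pvNA (wpb : List (List (Int × Int))) (Rl : Int) (step : Int) : List (Int × Int × Int) :=
  (pvPairs ((PySem.List.enumerate wpb).filter (fun ip => decide (step < PySem.List.len ip.2)))).flatMap
    (fun pq =>
      if |(PySem.List.pyGetD pq.1.2 step (0,0)).1 - (PySem.List.pyGetD pq.2.2 step (0,0)).1| ^ 2
         + |(PySem.List.pyGetD pq.1.2 step (0,0)).2 - (PySem.List.pyGetD pq.2.2 step (0,0)).2| ^ 2
         < 4 * Rl ^ 2 then [(pq.1.1, pq.2.1, step)] else [])

/-- B's pre-sort hit list, over ordered pairs of the enumerated batch. -/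
def pvNB (wpb : List (List (Int × Int))) (Rl : Int) : List (Int × Int × Int) :=
  (pvPairs (PySem.List.enumerate wpb)).flatMap (fun pq =>
    (PySem.List.pyRange 0 (min (PySem.List.len pq.1.2) (PySem.List.len pq.2.2))).flatMap (fun s =>
      if ((PySem.List.pyGetD pq.1.2 s (0,0)).1 - (PySem.List.pyGetD pq.2.2 s (0,0)).1)
           * ((PySem.List.pyGetD pq.1.2 s (0,0)).1 - (PySem.List.pyGetD pq.2.2 s (0,0)).1)
         + ((PySem.List.pyGetD pq.1.2 s (0,0)).2 - (PySem.List.pyGetD pq.2.2 s (0,0)).2)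
           * ((PySem.List.pyGetD pq.1.2 s (0,0)).2 - (PySem.List.pyGetD pq.2.2 s (0,0)).2)
         < 4 * Rl * Rl then [(pq.1.1, pq.2.1, s)] else []))

theorem pvA_eq (wpb : List (List (Int × Int))) (Rl : Int) (M : Int)
    (hM : PySem.List.max? (wpb.map (fun path => PySem.List.len path)) (fun x => x) = some M) :
    collision_in_path wpb Rl = (PySem.List.pyRange 0 M).flatMap (pvNA wpb Rl) := by
  unfold collision_in_path
  rw [hM]
  rw [← List.nil_append ((PySem.List.pyRange 0 M).flatMap (pvNA wpb Rl))]
  rw [← PySem.List.foldl_append_eq_flatMap]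
  apply PySem.List.foldl_congr_mem
  intro acc step _
  dsimp only []
  rw [pvFoldl_pair_filter (fun ip => step < PySem.List.len ip.2)
    (fun ip => PySem.List.pyGetD ip.2 step (0, 0)) (fun ip => ip.1)
    (PySem.List.enumerate wpb) [] []]
  simp only [List.nil_append]
  set act := (PySem.List.enumerate wpb).filter (fun ip => decide (step < PySem.List.len ip.2)) with hact
  set ptf : Int × List (Int × Int) → Int × Int := fun ip => PySem.List.pyGetD ip.2 step (0, 0) with hptf
  have hlen : PySem.List.len (act.map ptf) = PySem.List.len act := by
    simp [PySem.List.len]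
  rw [hlen]
  have hd1 : ∀ i : Int, PySem.List.pyGetD (act.map ptf) i (0,0)
      = ptf (PySem.List.pyGetD act i (0, [])) := by
    intro i
    have : ((0,0) : Int × Int) = ptf (0, []) := by
      simp [hptf, PySem.List.pyGetD, PySem.List.pyGet?, PySem.List.pyIdx?]
    rw [this, PySem.List.pyGetD_map]
  have hd2 : ∀ i : Int, PySem.List.pyGetD (act.map (fun ip => ip.1)) i 0
      = (PySem.List.pyGetD act i ((0 : Int), ([] : List (Int × Int)))).1 := by
    intro i
    exact PySem.List.pyGetD_map (fun ip => ip.1) act i (0, [])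
  have hnest : ∀ acc2 : List (Int × Int × Int),
      (PySem.List.pyRange 0 (PySem.List.len act)).foldl (fun c1 i =>
        (PySem.List.pyRange (i + 1) (PySem.List.len act)).foldl (fun c2 j =>
          if |(PySem.List.pyGetD (act.map ptf) i (0,0)).1 - (PySem.List.pyGetD (act.map ptf) j (0,0)).1| ^ 2
             + |(PySem.List.pyGetD (act.map ptf) i (0,0)).2 - (PySem.List.pyGetD (act.map ptf) j (0,0)).2| ^ 2
             < 4 * Rl ^ 2 then
            c2 ++ [(PySem.List.pyGetD (act.map (fun ip => ip.1)) i 0, PySem.List.pyGetD (act.map (fun ip => ip.1)) j 0, step)]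
          else c2) c1) acc2
      = acc2 ++ (PySem.List.pyRange 0 (PySem.List.len act)).flatMap (fun i =>
          (PySem.List.pyRange (i + 1) (PySem.List.len act)).flatMap (fun j =>
            if |(PySem.List.pyGetD (act.map ptf) i (0,0)).1 - (PySem.List.pyGetD (act.map ptf) j (0,0)).1| ^ 2
               + |(PySem.List.pyGetD (act.map ptf) i (0,0)).2 - (PySem.List.pyGetD (act.map ptf) j (0,0)).2| ^ 2
               < 4 * Rl ^ 2 then
              [(PySem.List.pyGetD (act.map (fun ip => ip.1)) i 0, PySem.List.pyGetD (act.map (fun ip => ip.1)) j 0, step)]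
            else [])) := by
    intro acc2
    rw [← PySem.List.foldl_append_eq_flatMap]
    apply PySem.List.foldl_congr_mem
    intro a i _
    rw [← PySem.List.foldl_append_eq_flatMap]
    apply PySem.List.foldl_congr_mem
    intro a2 j _
    by_cases h : |(PySem.List.pyGetD (act.map ptf) i (0,0)).1 - (PySem.List.pyGetD (act.map ptf) j (0,0)).1| ^ 2
               + |(PySem.List.pyGetD (act.map ptf) i (0,0)).2 - (PySem.List.pyGetD (act.map ptf) j (0,0)).2| ^ 2
               < 4 * Rl ^ 2
    · rw [if_pos h, if_pos h]
    · rw [if_neg h, if_neg h, List.append_nil]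
  rw [hnest acc]
  congr 1
  rw [pvRP]
  have hbody : ∀ pq : Int × Int,
      (if |(PySem.List.pyGetD (act.map ptf) pq.1 (0,0)).1 - (PySem.List.pyGetD (act.map ptf) pq.2 (0,0)).1| ^ 2
          + |(PySem.List.pyGetD (act.map ptf) pq.1 (0,0)).2 - (PySem.List.pyGetD (act.map ptf) pq.2 (0,0)).2| ^ 2
          < 4 * Rl ^ 2 then
        [(PySem.List.pyGetD (act.map (fun ip => ip.1)) pq.1 0, PySem.List.pyGetD (act.map (fun ip => ip.1)) pq.2 0, step)]
      else ([] : List (Int × Int × Int)))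
      = (fun x y =>
          if |(ptf x).1 - (ptf y).1| ^ 2 + |(ptf x).2 - (ptf y).2| ^ 2 < 4 * Rl ^ 2 then
            [(x.1, y.1, step)] else [])
        (PySem.List.pyGetD act pq.1 (0, [])) (PySem.List.pyGetD act pq.2 (0, [])) := by
    intro pq
    rw [hd1 pq.1, hd1 pq.2, hd2 pq.1, hd2 pq.2]
  rw [List.flatMap_congr (fun pq _ => hbody pq)]
  rw [pvPG act (0, []) (fun x y =>
      if |(ptf x).1 - (ptf y).1| ^ 2 + |(ptf x).2 - (ptf y).2| ^ 2 < 4 * Rl ^ 2 then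
        [(x.1, y.1, step)] else [])]
  rfl

theorem pvB_eq (wpb : List (List (Int × Int))) (Rl : Int) :
    collision_in_path_alt wpb Rl
      = PySem.List.sorted (pvNB wpb Rl) (fun t => t.2.2) false := by
  unfold collision_in_path_alt pvNB
  dsimp only []
  congr 1
  have hin : ∀ (pi pj : List (Int × Int)) (i j : Int) (acc : List (Int × Int × Int)),
      (PySem.List.pyRange 0 (min (PySem.List.len pi) (PySem.List.len pj))).foldl (fun hits step =>
        if ((PySem.List.pyGetD pi step (0,0)).1 - (PySem.List.pyGetD pj step (0,0)).1)
             * ((PySem.List.pyGetD pi step (0,0)).1 - (PySem.List.pyGetD pj step (0,0)).1)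
           + ((PySem.List.pyGetD pi step (0,0)).2 - (PySem.List.pyGetD pj step (0,0)).2)
             * ((PySem.List.pyGetD pi step (0,0)).2 - (PySem.List.pyGetD pj step (0,0)).2)
           < 4 * Rl * Rl then hits ++ [(i, j, step)] else hits) acc
      = acc ++ (PySem.List.pyRange 0 (min (PySem.List.len pi) (PySem.List.len pj))).flatMap (fun s =>
          if ((PySem.List.pyGetD pi s (0,0)).1 - (PySem.List.pyGetD pj s (0,0)).1)
               * ((PySem.List.pyGetD pi s (0,0)).1 - (PySem.List.pyGetD pj s (0,0)).1)
             + ((PySem.List.pyGetD pi s (0,0)).2 - (PySem.List.pyGetD pj s (0,0)).2)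
               * ((PySem.List.pyGetD pi s (0,0)).2 - (PySem.List.pyGetD pj s (0,0)).2)
             < 4 * Rl * Rl then [(i, j, s)] else []) := by
    intro pi pj i j acc
    rw [← PySem.List.foldl_append_eq_flatMap]
    apply PySem.List.foldl_congr_mem
    intro a s _
    by_cases h : ((PySem.List.pyGetD pi s (0,0)).1 - (PySem.List.pyGetD pj s (0,0)).1)
               * ((PySem.List.pyGetD pi s (0,0)).1 - (PySem.List.pyGetD pj s (0,0)).1)
             + ((PySem.List.pyGetD pi s (0,0)).2 - (PySem.List.pyGetD pj s (0,0)).2)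
               * ((PySem.List.pyGetD pi s (0,0)).2 - (PySem.List.pyGetD pj s (0,0)).2)
             < 4 * Rl * Rl <;> simp [h]
  have hmid : ∀ (acc : List (Int × Int × Int)),
      (PySem.List.pyRange 0 (PySem.List.len wpb)).foldl (fun hits i =>
        (PySem.List.pyRange (i + 1) (PySem.List.len wpb)).foldl (fun hits j =>
          (PySem.List.pyRange 0 (min (PySem.List.len (PySem.List.pyGetD wpb i []))
              (PySem.List.len (PySem.List.pyGetD wpb j [])))).foldl (fun hits step =>
            if ((PySem.List.pyGetD (PySem.List.pyGetD wpb i []) step (0,0)).1 - (PySem.List.pyGetD (PySem.List.pyGetD wpb j []) step (0,0)).1)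
                 * ((PySem.List.pyGetD (PySem.List.pyGetD wpb i []) step (0,0)).1 - (PySem.List.pyGetD (PySem.List.pyGetD wpb j []) step (0,0)).1)
               + ((PySem.List.pyGetD (PySem.List.pyGetD wpb i []) step (0,0)).2 - (PySem.List.pyGetD (PySem.List.pyGetD wpb j []) step (0,0)).2)
                 * ((PySem.List.pyGetD (PySem.List.pyGetD wpb i []) step (0,0)).2 - (PySem.List.pyGetD (PySem.List.pyGetD wpb j []) step (0,0)).2)
               < 4 * Rl * Rl then hits ++ [(i, j, step)] else hits) hits) hits) acc
      = acc ++ (PySem.List.pyRange 0 (PySem.List.len wpb)).flatMap (fun i =>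
          (PySem.List.pyRange (i + 1) (PySem.List.len wpb)).flatMap (fun j =>
            (PySem.List.pyRange 0 (min (PySem.List.len (PySem.List.pyGetD wpb i []))
                (PySem.List.len (PySem.List.pyGetD wpb j [])))).flatMap (fun s =>
              if ((PySem.List.pyGetD (PySem.List.pyGetD wpb i []) s (0,0)).1 - (PySem.List.pyGetD (PySem.List.pyGetD wpb j []) s (0,0)).1)
                   * ((PySem.List.pyGetD (PySem.List.pyGetD wpb i []) s (0,0)).1 - (PySem.List.pyGetD (PySem.List.pyGetD wpb j []) s (0,0)).1)
                 + ((PySem.List.pyGetD (PySem.List.pyGetD wpb i []) s (0,0)).2 - (PySem.List.pyGetD (PySem.List.pyGetD wpb j []) s (0,0)).2)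
                   * ((PySem.List.pyGetD (PySem.List.pyGetD wpb i []) s (0,0)).2 - (PySem.List.pyGetD (PySem.List.pyGetD wpb j []) s (0,0)).2)
                 < 4 * Rl * Rl then [(i, j, s)] else []))) := by
    intro acc
    rw [← PySem.List.foldl_append_eq_flatMap]
    apply PySem.List.foldl_congr_mem
    intro a i _
    rw [← PySem.List.foldl_append_eq_flatMap]
    apply PySem.List.foldl_congr_mem
    intro a2 j _
    exact hin _ _ i j a2
  rw [hmid []]
  rw [List.nil_append]
  rw [pvRP]
  rw [PySem.List.enumerate_eq_map_pyRange wpb [], pvPairs_map, List.flatMap_map]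
  rfl

theorem pvNB_bound (wpb : List (List (Int × Int))) (Rl : Int) (M : Int)
    (hM : PySem.List.max? (wpb.map (fun path => PySem.List.len path)) (fun x => x) = some M) :
    ∀ t ∈ pvNB wpb Rl, 0 ≤ t.2.2 ∧ t.2.2 < M := by
  intro t ht
  rw [pvNB, List.mem_flatMap] at ht
  obtain ⟨pq, hpq, ht⟩ := ht
  rw [List.mem_flatMap] at ht
  obtain ⟨s, hs, ht⟩ := ht
  rw [PySem.List.mem_pyRange_one] at hs
  have hts : t.2.2 = s := by
    by_cases h : ((PySem.List.pyGetD pq.1.2 s (0,0)).1 - (PySem.List.pyGetD pq.2.2 s (0,0)).1)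
           * ((PySem.List.pyGetD pq.1.2 s (0,0)).1 - (PySem.List.pyGetD pq.2.2 s (0,0)).1)
         + ((PySem.List.pyGetD pq.1.2 s (0,0)).2 - (PySem.List.pyGetD pq.2.2 s (0,0)).2)
           * ((PySem.List.pyGetD pq.1.2 s (0,0)).2 - (PySem.List.pyGetD pq.2.2 s (0,0)).2)
         < 4 * Rl * Rl
    · rw [if_pos h, List.mem_singleton] at ht
      rw [ht]
    · rw [if_neg h] at ht
      simp at ht
  have h1 : pq.1 ∈ PySem.List.enumerate wpb := (pvPairs_mem hpq).1
  rw [PySem.List.mem_enumerate_iff] at h1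
  obtain ⟨k, hk, hpq1⟩ := h1
  have hmem : PySem.List.len pq.1.2 ∈ wpb.map (fun path => PySem.List.len path) := by
    rw [hpq1]
    exact List.mem_map_of_mem (List.getElem_mem hk)
  have := PySem.List.max?_isMax hM _ hmem
  constructor
  · omega
  · simp only [lt_min_iff] at hs
    omega

theorem pvStep_eq (wpb : List (List (Int × Int))) (Rl : Int) (s : Int) (hs : 0 ≤ s) :
    pvNA wpb Rl s = (pvNB wpb Rl).filter (fun t => t.2.2 == s) := by
  rw [pvNA, pvNB, pvPairs_filter, pvFlatMap_filter, List.filter_flatMap]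
  apply List.flatMap_congr
  intro pq _
  rw [List.filter_flatMap]
  have hinner : ∀ s' ∈ PySem.List.pyRange 0 (min (PySem.List.len pq.1.2) (PySem.List.len pq.2.2)),
      (if ((PySem.List.pyGetD pq.1.2 s' (0,0)).1 - (PySem.List.pyGetD pq.2.2 s' (0,0)).1)
           * ((PySem.List.pyGetD pq.1.2 s' (0,0)).1 - (PySem.List.pyGetD pq.2.2 s' (0,0)).1)
         + ((PySem.List.pyGetD pq.1.2 s' (0,0)).2 - (PySem.List.pyGetD pq.2.2 s' (0,0)).2)
           * ((PySem.List.pyGetD pq.1.2 s' (0,0)).2 - (PySem.List.pyGetD pq.2.2 s' (0,0)).2)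
         < 4 * Rl * Rl then [(pq.1.1, pq.2.1, s')] else []).filter (fun t => t.2.2 == s)
      = (if s' = s then
          (if ((PySem.List.pyGetD pq.1.2 s (0,0)).1 - (PySem.List.pyGetD pq.2.2 s (0,0)).1)
               * ((PySem.List.pyGetD pq.1.2 s (0,0)).1 - (PySem.List.pyGetD pq.2.2 s (0,0)).1)
             + ((PySem.List.pyGetD pq.1.2 s (0,0)).2 - (PySem.List.pyGetD pq.2.2 s (0,0)).2)
               * ((PySem.List.pyGetD pq.1.2 s (0,0)).2 - (PySem.List.pyGetD pq.2.2 s (0,0)).2)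
             < 4 * Rl * Rl then [(pq.1.1, pq.2.1, s)] else [])
        else []) := by
    intro s' _
    by_cases hss : s' = s
    · subst hss
      rw [if_pos rfl]
      by_cases h : ((PySem.List.pyGetD pq.1.2 s' (0,0)).1 - (PySem.List.pyGetD pq.2.2 s' (0,0)).1)
           * ((PySem.List.pyGetD pq.1.2 s' (0,0)).1 - (PySem.List.pyGetD pq.2.2 s' (0,0)).1)
         + ((PySem.List.pyGetD pq.1.2 s' (0,0)).2 - (PySem.List.pyGetD pq.2.2 s' (0,0)).2)
           * ((PySem.List.pyGetD pq.1.2 s' (0,0)).2 - (PySem.List.pyGetD pq.2.2 s' (0,0)).2)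
         < 4 * Rl * Rl
      · rw [if_pos h]
        simp
      · rw [if_neg h]
        rfl
    · rw [if_neg hss]
      by_cases h : ((PySem.List.pyGetD pq.1.2 s' (0,0)).1 - (PySem.List.pyGetD pq.2.2 s' (0,0)).1)
           * ((PySem.List.pyGetD pq.1.2 s' (0,0)).1 - (PySem.List.pyGetD pq.2.2 s' (0,0)).1)
         + ((PySem.List.pyGetD pq.1.2 s' (0,0)).2 - (PySem.List.pyGetD pq.2.2 s' (0,0)).2)
           * ((PySem.List.pyGetD pq.1.2 s' (0,0)).2 - (PySem.List.pyGetD pq.2.2 s' (0,0)).2)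
         < 4 * Rl * Rl
      · rw [if_pos h]
        simp [hss]
      · rw [if_neg h]
        rfl
  rw [List.flatMap_congr hinner, pvFlatMap_range_single]
  by_cases halive : (decide (s < PySem.List.len pq.1.2) && decide (s < PySem.List.len pq.2.2)) = true
  · have halive' := halive
    simp only [Bool.and_eq_true, decide_eq_true_eq] at halive'
    rw [if_pos halive,
      if_pos (show 0 ≤ s ∧ s < min (PySem.List.len pq.1.2) (PySem.List.len pq.2.2) from
        ⟨hs, by simp only [lt_min_iff]; exact halive'⟩)]
    have e1 : ∀ a : Int, |a| ^ 2 = a * a := fun a => by rw [pow_two, abs_mul_abs_self]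
    have e2 : (4 * Rl ^ 2 : Int) = 4 * Rl * Rl := by ring
    by_cases h : ((PySem.List.pyGetD pq.1.2 s (0,0)).1 - (PySem.List.pyGetD pq.2.2 s (0,0)).1)
         * ((PySem.List.pyGetD pq.1.2 s (0,0)).1 - (PySem.List.pyGetD pq.2.2 s (0,0)).1)
       + ((PySem.List.pyGetD pq.1.2 s (0,0)).2 - (PySem.List.pyGetD pq.2.2 s (0,0)).2)
         * ((PySem.List.pyGetD pq.1.2 s (0,0)).2 - (PySem.List.pyGetD pq.2.2 s (0,0)).2)
       < 4 * Rl * Rl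
    · rw [if_pos (show |(PySem.List.pyGetD pq.1.2 s (0,0)).1 - (PySem.List.pyGetD pq.2.2 s (0,0)).1| ^ 2
          + |(PySem.List.pyGetD pq.1.2 s (0,0)).2 - (PySem.List.pyGetD pq.2.2 s (0,0)).2| ^ 2
          < 4 * Rl ^ 2 from by rw [e1, e1, e2]; exact h), if_pos h]
    · rw [if_neg (show ¬(|(PySem.List.pyGetD pq.1.2 s (0,0)).1 - (PySem.List.pyGetD pq.2.2 s (0,0)).1| ^ 2
          + |(PySem.List.pyGetD pq.1.2 s (0,0)).2 - (PySem.List.pyGetD pq.2.2 s (0,0)).2| ^ 2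
          < 4 * Rl ^ 2) from by rw [e1, e1, e2]; exact h), if_neg h]
  · rw [if_neg halive]
    rw [if_neg (by
      simp only [Bool.and_eq_true, decide_eq_true_eq] at halive
      intro hc
      rcases hc with ⟨_, hc2⟩
      simp only [lt_min_iff] at hc2
      exact halive ⟨hc2.1, hc2.2⟩)]

-- ===== VERDICT (by name: the statement is the Claim_ definition above) =====
theorem collision_in_path_spec : Claim_equal_collision_in_path := by
  intro wpb Rl _ hpre
  unfold Spec_collision_in_path
  obtain ⟨M, hM⟩ : ∃ M, PySem.List.max? (wpb.map (fun path => PySem.List.len path)) (fun x => x) = some M := by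
    cases h : PySem.List.max? (wpb.map (fun path => PySem.List.len path)) (fun x => x) with
    | none => exact absurd (by simpa using (PySem.List.max?_eq_none_iff _ _).mp h) hpre
    | some M => exact ⟨M, rfl⟩
  rw [pvA_eq wpb Rl M hM, pvB_eq wpb Rl]
  rw [pvBucket M (pvNB wpb Rl) (pvNB_bound wpb Rl M hM)]
  apply List.flatMap_congr
  intro s hsmem
  rw [PySem.List.mem_pyRange_one] at hsmem
  exact pvStep_eq wpb Rl s hsmem.1
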